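-- pv_equiv track=rewrite | github.com/k3072r/make_schedule | calc_loss.py | loss_student_sparse
-- ===== SOURCE A (Python) =====
-- def loss_student_sparse(day):
--
--     a = -1
--     b = -1
--     flag = False #その日最初の授業をaに入れたか否か（aがNoneか否か）
--     loss = 20
--     losses = 0
--
--     for i in range(7):
--         if not (day[i] == "free" or day[i] == "lock"):
--             if flag:
--                 b = i
--                 if b - a == 1:
--                     a = b
--                 else:
--                     losses += loss
--                     break
--             else:
--                 a = i
--                 flag = True
--             # end if
--         # end if
--     #end for
--     return losses
-- ===== SOURCE B (Python) =====
-- def loss_student_sparse(day):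
--     # three-phase scan: skip the free prefix, skip the contiguous busy block,
--     # then any further busy slot means the schedule has a gap
--     i = 0
--     while i < 7 and day[i] in ("free", "lock"):
--         i += 1
--     while i < 7 and day[i] not in ("free", "lock"):
--         i += 1
--     while i < 7:
--         if day[i] not in ("free", "lock"):
--             return 20
--         i += 1
--     return 0
-- ===== Notes on version B (the rewrite author's own statement) =====
-- stated objective: simpler
-- what changed: Replaces A's stateful sliding scan (flag, last index a, gap arithmetic b-a, losses accumulator, break) by a three-phase scan: skip the free prefix, skip the contiguous busy block, and return 20 iff any later slot is busy.
import Mathlib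
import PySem

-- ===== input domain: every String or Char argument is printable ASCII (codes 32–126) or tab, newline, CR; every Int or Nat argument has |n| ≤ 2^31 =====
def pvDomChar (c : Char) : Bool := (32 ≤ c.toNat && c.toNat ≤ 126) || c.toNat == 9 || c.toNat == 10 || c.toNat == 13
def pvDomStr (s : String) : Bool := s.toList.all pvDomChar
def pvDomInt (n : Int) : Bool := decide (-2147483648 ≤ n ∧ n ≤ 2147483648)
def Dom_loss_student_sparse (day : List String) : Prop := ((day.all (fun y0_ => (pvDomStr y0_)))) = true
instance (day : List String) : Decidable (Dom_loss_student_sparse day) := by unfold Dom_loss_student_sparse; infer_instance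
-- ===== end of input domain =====

-- B replaces A's stateful sliding scan (flag/a/b/losses/break) by a three-phase
-- scan: skip the free prefix, skip the busy block, any later busy slot is a gap
-- (objective: simpler).

-- ===== PORT A =====
-- `day[i]`: inside Pre_ every index the scan actually reads is in range, so
-- Python indexing is exact `List.getD i ""` (the default is never read there).
def pvBusy (s : String) : Bool := !(s == "free" || s == "lock")

-- the for-loop of A: `rem` iterations left, current index `i`, state `a`/`flag`
-- (`b` is local to an iteration; `losses` is 0 until the break, which returns 20).
def pvLossGo (day : List String) : Nat → Nat → Int → Bool → Int
  | _, 0, _, _ => 0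
  | i, rem+1, a, flag =>
    if pvBusy (day.getD i "") then
      if flag then
        if (i : Int) - a = 1 then pvLossGo day (i+1) rem i true
        else 20
      else pvLossGo day (i+1) rem i true
    else pvLossGo day (i+1) rem a flag

def loss_student_sparse (day : List String) : Int :=
  pvLossGo day 0 7 (-1) false

-- ===== PORT B =====
-- B's three while-loops, each with fuel 7 (the loop body runs at most 7 times;
-- the fuel only makes the recursion structural, it never changes the result).
def pvSkipFree (day : List String) : Nat → Nat → Nat
  | 0, i => i
  | f+1, i => if i < 7 ∧ ¬ pvBusy (day.getD i "") then pvSkipFree day f (i+1) else i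

def pvSkipBusy (day : List String) : Nat → Nat → Nat
  | 0, i => i
  | f+1, i => if i < 7 ∧ pvBusy (day.getD i "") then pvSkipBusy day f (i+1) else i

def pvTail (day : List String) : Nat → Nat → Int
  | 0, _ => 0
  | f+1, i => if i < 7 then (if pvBusy (day.getD i "") then 20 else pvTail day f (i+1)) else 0

def loss_student_sparse_alt (day : List String) : Int :=
  pvTail day 7 (pvSkipBusy day 7 (pvSkipFree day 7 0))

-- ===== PRECONDITION & SPEC =====
-- Pre_ is exactly where Python A returns: either the day has the full 7 slots,
-- or a busy–free–busy pattern occurs early enough that A's break on the first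
-- gap fires before its scan runs off the end of a shorter list.
def Pre_loss_student_sparse (day : List String) : Prop :=
  7 ≤ day.length ∨
    ∃ k < day.length, ∃ m < k, ∃ j < m,
      pvBusy (day.getD j "") = true ∧ pvBusy (day.getD m "") = false ∧
        pvBusy (day.getD k "") = true
instance (day : List String) : Decidable (Pre_loss_student_sparse day) := by unfold Pre_loss_student_sparse; infer_instance
def pvWitness_loss_student_sparse : List String :=
  ["free", "math", "math", "free", "eng", "free", "free"]

def Spec_loss_student_sparse (day : List String) (out : Int) : Prop := out = loss_student_sparse_alt day
instance (day : List String) (out : Int) : Decidable (Spec_loss_student_sparse day out) := by unfold Spec_loss_student_sparse; infer_instance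

-- ===== CLAIM (what is proved, stated in full; the proofs are below) =====
def Claim_equal_loss_student_sparse : Prop := ∀ (day : List String), Dom_loss_student_sparse day → Pre_loss_student_sparse day → Spec_loss_student_sparse day (loss_student_sparse day)

-- ===== LEMMAS AND PROOFS =====

-- Both ports abstracted to the list of the 7 "busy" bits they inspect.
def pvGoBits : List Bool → Nat → Int → Bool → Int
  | [], _, _, _ => 0
  | b :: bs, i, a, flag =>
    if b then
      if flag then
        if (i : Int) - a = 1 then pvGoBits bs (i+1) i true
        else 20
      else pvGoBits bs (i+1) i true
    else pvGoBits bs (i+1) a flag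

def pvSkipFreeB (bs : List Bool) : Nat → Nat → Nat
  | 0, i => i
  | f+1, i => if i < 7 ∧ ¬ bs.getD i false then pvSkipFreeB bs f (i+1) else i

def pvSkipBusyB (bs : List Bool) : Nat → Nat → Nat
  | 0, i => i
  | f+1, i => if i < 7 ∧ bs.getD i false then pvSkipBusyB bs f (i+1) else i

def pvTailB (bs : List Bool) : Nat → Nat → Int
  | 0, _ => 0
  | f+1, i => if i < 7 then (if bs.getD i false then 20 else pvTailB bs f (i+1)) else 0

theorem pvLossGo_eq_goBits (day : List String) (rem : Nat) :
    ∀ (i : Nat) (a : Int) (flag : Bool),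
      pvLossGo day i rem a flag
        = pvGoBits ((List.range' i rem).map (fun j => pvBusy (day.getD j ""))) i a flag := by
  induction rem with
  | zero => intro i a flag; simp [pvLossGo, pvGoBits]
  | succ n ih =>
    intro i a flag
    rw [List.range'_succ, List.map_cons]
    simp only [pvLossGo, pvGoBits]
    split_ifs <;> simp [ih]

theorem pvSkipFree_eq (day : List String) (bs : List Bool)
    (hb : ∀ j, j < 7 → bs.getD j false = pvBusy (day.getD j "")) :
    ∀ (f i : Nat), pvSkipFreeB bs f i = pvSkipFree day f i := by
  intro f
  induction f with
  | zero => intro i; rfl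
  | succ n ih =>
    intro i
    rw [pvSkipFreeB, pvSkipFree]
    by_cases h7 : i < 7
    · rw [hb i h7]; split_ifs with hc
      · exact ih (i+1)
      · rfl
    · simp [h7]

theorem pvSkipBusy_eq (day : List String) (bs : List Bool)
    (hb : ∀ j, j < 7 → bs.getD j false = pvBusy (day.getD j "")) :
    ∀ (f i : Nat), pvSkipBusyB bs f i = pvSkipBusy day f i := by
  intro f
  induction f with
  | zero => intro i; rfl
  | succ n ih =>
    intro i
    rw [pvSkipBusyB, pvSkipBusy]
    by_cases h7 : i < 7
    · rw [hb i h7]; split_ifs with hc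
      · exact ih (i+1)
      · rfl
    · simp [h7]

theorem pvTail_eq (day : List String) (bs : List Bool)
    (hb : ∀ j, j < 7 → bs.getD j false = pvBusy (day.getD j "")) :
    ∀ (f i : Nat), pvTailB bs f i = pvTail day f i := by
  intro f
  induction f with
  | zero => intro i; rfl
  | succ n ih =>
    intro i
    rw [pvTailB, pvTail]
    by_cases h7 : i < 7
    · rw [hb i h7]; split_ifs with hc <;> simp [ih]
    · simp [h7]

theorem pvBits_core :
    ∀ b0 b1 b2 b3 b4 b5 b6 : Bool,
      pvGoBits [b0, b1, b2, b3, b4, b5, b6] 0 (-1) false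
        = pvTailB [b0, b1, b2, b3, b4, b5, b6] 7
            (pvSkipBusyB [b0, b1, b2, b3, b4, b5, b6] 7
              (pvSkipFreeB [b0, b1, b2, b3, b4, b5, b6] 7 0)) := by
  decide

theorem loss_main (day : List String) :
    loss_student_sparse day = loss_student_sparse_alt day := by
  set bs : List Bool := (List.range 7).map (fun j => pvBusy (day.getD j "")) with hbs
  have hb : ∀ j, j < 7 → bs.getD j false = pvBusy (day.getD j "") := by
    intro j hj
    simp [hbs, List.getD, hj]
  have hA := pvLossGo_eq_goBits day 7 0 (-1) false
  have hrange : List.range' 0 7 = List.range 7 := List.range_eq_range'.symm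
  rw [hrange, ← hbs] at hA
  have hB : loss_student_sparse_alt day = pvTailB bs 7 (pvSkipBusyB bs 7 (pvSkipFreeB bs 7 0)) := by
    rw [loss_student_sparse_alt, pvTail_eq day bs hb, pvSkipBusy_eq day bs hb,
        pvSkipFree_eq day bs hb]
  rw [loss_student_sparse, hA, hB]
  have hbs7 : bs = [bs.getD 0 false, bs.getD 1 false, bs.getD 2 false, bs.getD 3 false,
      bs.getD 4 false, bs.getD 5 false, bs.getD 6 false] := by
    simp [hbs, List.range_succ]
  rw [hbs7]
  exact pvBits_core _ _ _ _ _ _ _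

-- ===== VERDICT (by name: the statement is the Claim_ definition above) =====
theorem loss_student_sparse_spec : Claim_equal_loss_student_sparse := by
  intro day _ _
  exact loss_main day
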